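-- pv_equiv track=rewrite | github.com/monash-wsrn/nrf-bridge-py3 | test_orientation.py | get_all_5_sequences
-- ===== SOURCE A (Python) =====
-- def get_all_5_sequences(sequence):
--     '''
--         Get all sequences of 5 elements (circular list)
--     :param sequence: Sequence to split
--     :return: List of sequences
--     '''
--     number_leds = len(sequence)
--     if number_leds < 5:
--         return None
--     five_sequences = []
--     for i in range(number_leds):
--         if i + 5 >= number_leds:
--             remaining_elem = i + 5 - number_leds
--             five_sequences.append(sequence[i:number_leds] + sequence[0:remaining_elem])
--         else:
--             five_sequences.append(sequence[i:i + 5])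
--     return five_sequences
-- ===== SOURCE B (Python) =====
-- def get_all_5_sequences(sequence):
--     if len(sequence) < 5:
--         return None
--     rotations = [sequence[k:] + sequence[:k] for k in range(5)]
--     return [list(window) for window in zip(*rotations)]
-- ===== Notes on version B (the rewrite author's own statement) =====
-- stated objective: alternative
-- what changed: B builds the five rotations of the sequence once and transposes them with zip, so each window is a column of the rotation matrix; A instead loops over indices slicing each window with a wraparound branch.
import Mathlib
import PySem

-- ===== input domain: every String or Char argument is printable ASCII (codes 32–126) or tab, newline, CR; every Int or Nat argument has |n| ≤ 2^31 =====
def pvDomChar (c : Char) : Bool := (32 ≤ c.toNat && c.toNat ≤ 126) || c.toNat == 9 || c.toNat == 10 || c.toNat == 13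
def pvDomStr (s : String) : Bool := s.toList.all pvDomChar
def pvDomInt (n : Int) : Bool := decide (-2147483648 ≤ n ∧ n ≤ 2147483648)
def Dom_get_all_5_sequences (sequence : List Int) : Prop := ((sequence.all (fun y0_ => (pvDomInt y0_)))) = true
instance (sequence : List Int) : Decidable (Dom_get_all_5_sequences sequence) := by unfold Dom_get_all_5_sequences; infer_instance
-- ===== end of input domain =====

-- B builds the five rotations of the sequence once and transposes them with zip (each circular
-- window is a column of the rotation matrix), replacing A's index loop with a wraparound branch
-- (objective: alternative). Equivalence proved on all inputs.

-- ===== PORT A =====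
def get_all_5_sequences (sequence : List Int) : Option (List (List Int)) :=
  let number_leds : Int := (sequence.length : Int)
  if number_leds < 5 then none
  else
    some ((PySem.List.pyRange 0 number_leds 1).foldl (fun five_sequences i =>
      if i + 5 ≥ number_leds then
        let remaining_elem := i + 5 - number_leds
        five_sequences ++ [PySem.List.slice sequence (some i) (some number_leds) ++
                           PySem.List.slice sequence (some 0) (some remaining_elem)]
      else
        five_sequences ++ [PySem.List.slice sequence (some i) (some (i + 5))]) [])

-- ===== PORT B =====
-- one rotation sequence[k:] + sequence[:k]
def pvRot (seq : List Int) (k : Int) : List Int :=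
  PySem.List.slice seq (some k) none ++ PySem.List.slice seq none (some k)

-- Python's zip(*rotations) on exactly five lists: truncates at the shortest, columns as lists
def pvZip5 : List Int → List Int → List Int → List Int → List Int → List (List Int)
  | a :: as, b :: bs, c :: cs, d :: ds, e :: es => [a, b, c, d, e] :: pvZip5 as bs cs ds es
  | _, _, _, _, _ => []

def get_all_5_sequences_alt (sequence : List Int) : Option (List (List Int)) :=
  if (sequence.length : Int) < 5 then none
  else
    -- rotations = [sequence[k:] + sequence[:k] for k in range(5)] (unrolled), then zip(*rotations)
    some (pvZip5 (pvRot sequence 0) (pvRot sequence 1) (pvRot sequence 2)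
                 (pvRot sequence 3) (pvRot sequence 4))

-- ===== PRECONDITION & SPEC =====
def Spec_get_all_5_sequences (sequence : List Int) (out : Option (List (List Int))) : Prop := out = get_all_5_sequences_alt sequence
instance (sequence : List Int) (out : Option (List (List Int))) : Decidable (Spec_get_all_5_sequences sequence out) := by unfold Spec_get_all_5_sequences; infer_instance

-- ===== CLAIM =====
def Claim_equal_get_all_5_sequences : Prop := ∀ (sequence : List Int), Dom_get_all_5_sequences sequence → Spec_get_all_5_sequences sequence (get_all_5_sequences sequence)

-- ===== LEMMAS AND PROOFS =====

-- canonical circular window at index k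
def pvWin (seq : List Int) (k : Nat) : List Int :=
  [seq.getD ((k + 0) % seq.length) 0, seq.getD ((k + 1) % seq.length) 0,
   seq.getD ((k + 2) % seq.length) 0, seq.getD ((k + 3) % seq.length) 0,
   seq.getD ((k + 4) % seq.length) 0]

lemma pvWin_length (seq : List Int) (k : Nat) : (pvWin seq k).length = 5 := rfl

lemma pvCons_of_len_succ {l : List Int} {n : Nat} (h : l.length = n + 1) :
    ∃ x xs, l = x :: xs := by
  cases l with
  | nil => simp at h
  | cons x xs => exact ⟨x, xs, rfl⟩

lemma getElem_pvWin (seq : List Int) (k i : Nat) (h : i < (pvWin seq k).length) :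
    (pvWin seq k)[i] = seq.getD ((k + i) % seq.length) 0 := by
  have hi : i < 5 := by simpa [pvWin] using h
  unfold pvWin
  interval_cases i <;> rfl

lemma pvRot_natCast (seq : List Int) (k : Nat) :
    pvRot seq (k : Int) = seq.drop k ++ seq.take k := by
  unfold pvRot
  rw [PySem.List.slice_from_natCast, PySem.List.slice_to_natCast]

lemma pvRot_length (seq : List Int) (k : Nat) (hk : k ≤ seq.length) :
    (seq.drop k ++ seq.take k).length = seq.length := by simp; omega

lemma mod_small {a n : Nat} (h : a < n) : a % n = a := Nat.mod_eq_of_lt h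

lemma mod_wrap {a n : Nat} (h1 : n ≤ a) (h2 : a < 2 * n) : a % n = a - n := by
  rw [Nat.mod_eq_sub_mod h1, Nat.mod_eq_of_lt (by omega)]

-- element i of a rotation is the element (i+k) mod n of seq
lemma rot_getD (seq : List Int) (k i : Nat) (hk : k ≤ seq.length) (hi : i < seq.length) :
    (seq.drop k ++ seq.take k).getD i 0 = seq.getD ((i + k) % seq.length) 0 := by
  have hn : 0 < seq.length := by omega
  rw [List.getD_eq_getElem seq 0 (by exact Nat.mod_lt _ hn),
      List.getD_eq_getElem _ 0 (by rw [pvRot_length seq k hk]; exact hi)]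
  by_cases h : i < seq.length - k
  · rw [List.getElem_append_left (by simp [List.length_drop]; omega)]
    rw [List.getElem_drop]
    have : (i + k) % seq.length = k + i := by rw [mod_small (by omega)]; omega
    simp [this]
  · rw [List.getElem_append_right (by simp [List.length_drop]; omega)]
    have e : (i + k) % seq.length = i + k - seq.length := mod_wrap (by omega) (by omega)
    simp only [List.getElem_take, List.length_drop]
    congr 1
    omega

-- zip of five equal-length lists, as a map over indices
lemma zip5_eq_map (n : Nat) : ∀ (a b c d e : List Int),
    a.length = n → b.length = n → c.length = n → d.length = n → e.length = n →
    pvZip5 a b c d e = (List.range n).map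
      (fun i => [a.getD i 0, b.getD i 0, c.getD i 0, d.getD i 0, e.getD i 0]) := by
  induction n with
  | zero =>
    intro a b c d e ha hb hc hd he
    rw [List.length_eq_zero_iff] at ha hb hc hd he
    subst ha hb hc hd he
    rfl
  | succ n ih =>
    intro a b c d e ha hb hc hd he
    obtain ⟨a0, as, rfl⟩ := pvCons_of_len_succ ha
    obtain ⟨b0, bs, rfl⟩ := pvCons_of_len_succ hb
    obtain ⟨c0, cs, rfl⟩ := pvCons_of_len_succ hc
    obtain ⟨d0, ds, rfl⟩ := pvCons_of_len_succ hd
    obtain ⟨e0, es, rfl⟩ := pvCons_of_len_succ he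
    simp only [List.length_cons, Nat.succ.injEq] at ha hb hc hd he
    rw [show pvZip5 (a0 :: as) (b0 :: bs) (c0 :: cs) (d0 :: ds) (e0 :: es) =
        [a0, b0, c0, d0, e0] :: pvZip5 as bs cs ds es from rfl,
      ih as bs cs ds es (by omega) (by omega) (by omega) (by omega) (by omega),
      List.range_succ_eq_map, List.map_cons, List.map_map]
    rfl

-- A's non-wrapping window equals the canonical window
lemma winA_no_wrap (seq : List Int) (k : Nat) (h : k + 5 ≤ seq.length) :
    (seq.drop k).take 5 = pvWin seq k := by
  apply List.ext_getElem
  · simp only [List.length_take, List.length_drop, pvWin_length]; omega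
  · intro i h1 h2
    have hi5 : i < 5 := by simp only [pvWin_length] at h2; omega
    rw [getElem_pvWin seq k i h2, List.getElem_take, List.getElem_drop,
      List.getD_eq_getElem seq 0 (by rw [mod_small (by omega)]; omega)]
    congr 1
    rw [mod_small (by omega)]

-- A's wrapping window equals the canonical window
lemma winA_wrap (seq : List Int) (k : Nat) (h5 : 5 ≤ seq.length)
    (hk : k < seq.length) (h : seq.length ≤ k + 5) :
    (seq.drop k).take (seq.length - k) ++ seq.take (k + 5 - seq.length) = pvWin seq k := by
  have hdrop : (seq.drop k).take (seq.length - k) = seq.drop k := by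
    apply List.take_of_length_le; simp
  rw [hdrop]
  apply List.ext_getElem
  · simp only [List.length_append, List.length_drop, List.length_take, pvWin_length]; omega
  · intro i h1 h2
    have hi5 : i < 5 := by simp only [pvWin_length] at h2; omega
    rw [getElem_pvWin seq k i h2]
    by_cases hc : i < seq.length - k
    · rw [List.getElem_append_left (by simp; omega), List.getElem_drop,
        List.getD_eq_getElem seq 0 (by rw [mod_small (by omega)]; omega)]
      congr 1
      rw [mod_small (by omega)]
    · rw [List.getElem_append_right (by simp; omega)]
      have e : (k + i) % seq.length = k + i - seq.length := mod_wrap (by omega) (by omega)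
      rw [List.getD_eq_getElem seq 0 (by rw [e]; omega)]
      simp only [List.getElem_take, List.length_drop]
      congr 1
      omega

-- ===== VERDICT =====
theorem get_all_5_sequences_spec : Claim_equal_get_all_5_sequences := by
  intro seq _
  unfold Spec_get_all_5_sequences get_all_5_sequences get_all_5_sequences_alt
  simp only []
  by_cases h5 : (seq.length : Int) < 5
  · simp [h5]
  · have h5n : 5 ≤ seq.length := by omega
    simp only [h5, if_false]
    congr 1
    -- A side: fold of appends is a map over the range
    have hbody : (fun (five_sequences : List (List Int)) (i : Int) =>
        if i + 5 ≥ (seq.length : Int) then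
          five_sequences ++ [PySem.List.slice seq (some i) (some (seq.length : Int)) ++
                             PySem.List.slice seq (some 0) (some (i + 5 - (seq.length : Int)))]
        else
          five_sequences ++ [PySem.List.slice seq (some i) (some (i + 5))]) =
        (fun five_sequences i => five_sequences ++
          [if i + 5 ≥ (seq.length : Int) then
            PySem.List.slice seq (some i) (some (seq.length : Int)) ++
              PySem.List.slice seq (some 0) (some (i + 5 - (seq.length : Int)))
          else PySem.List.slice seq (some i) (some (i + 5))]) := by
      funext acc i; split <;> rfl
    rw [hbody, PySem.List.foldl_append_singleton_eq_map, List.nil_append,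
      PySem.List.pyRange_one]
    simp only [Int.sub_zero, Int.toNat_natCast, List.map_map]
    -- both sides equal the canonical map of circular windows
    have hA : ∀ k ∈ List.range seq.length,
        ((fun i => if i + 5 ≥ (seq.length : Int) then
            PySem.List.slice seq (some i) (some (seq.length : Int)) ++
              PySem.List.slice seq (some 0) (some (i + 5 - (seq.length : Int)))
          else PySem.List.slice seq (some i) (some (i + 5))) ∘ (fun k : Nat => (0 : Int) + ↑k)) k
          = pvWin seq k := by
      intro k hk
      have hkn : k < seq.length := List.mem_range.mp hk
      simp only [Function.comp, Int.zero_add]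
      by_cases hw : (k : Int) + 5 ≥ (seq.length : Int)
      · have hw' : seq.length ≤ k + 5 := by exact_mod_cast hw
        rw [if_pos hw]
        have h1 : PySem.List.slice seq (some (k : Int)) (some (seq.length : Int)) =
            (seq.drop k).take (seq.length - k) := by rw [PySem.List.slice_natCast]
        have h2 : PySem.List.slice seq (some 0) (some ((k : Int) + 5 - (seq.length : Int))) =
            seq.take (k + 5 - seq.length) := by
          rw [show ((k : Int) + 5 - (seq.length : Int)) = ((k + 5 - seq.length : Nat) : Int) by
            push_cast [hw']; omega]
          rw [PySem.List.slice_zero_start, PySem.List.slice_to_natCast]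
        rw [h1, h2, winA_wrap seq k h5n hkn hw']
      · have hw' : k + 5 ≤ seq.length := by push_cast at hw; omega
        rw [if_neg hw]
        rw [show (k : Int) + 5 = ((k + 5 : Nat) : Int) by push_cast; ring,
          PySem.List.slice_natCast, show k + 5 - k = 5 by omega, winA_no_wrap seq k hw']
    rw [List.map_congr_left hA]
    -- B side
    have r0 : pvRot seq 0 = seq.drop 0 ++ seq.take 0 := by
      rw [show (0 : Int) = ((0 : Nat) : Int) by norm_num, pvRot_natCast]
    have r1 : pvRot seq 1 = seq.drop 1 ++ seq.take 1 := by
      rw [show (1 : Int) = ((1 : Nat) : Int) by norm_num, pvRot_natCast]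
    have r2 : pvRot seq 2 = seq.drop 2 ++ seq.take 2 := by
      rw [show (2 : Int) = ((2 : Nat) : Int) by norm_num, pvRot_natCast]
    have r3 : pvRot seq 3 = seq.drop 3 ++ seq.take 3 := by
      rw [show (3 : Int) = ((3 : Nat) : Int) by norm_num, pvRot_natCast]
    have r4 : pvRot seq 4 = seq.drop 4 ++ seq.take 4 := by
      rw [show (4 : Int) = ((4 : Nat) : Int) by norm_num, pvRot_natCast]
    rw [r0, r1, r2, r3, r4,
      zip5_eq_map seq.length _ _ _ _ _
        (pvRot_length seq 0 (by omega)) (pvRot_length seq 1 (by omega))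
        (pvRot_length seq 2 (by omega)) (pvRot_length seq 3 (by omega))
        (pvRot_length seq 4 (by omega))]
    apply List.map_congr_left
    intro i hi
    have hin : i < seq.length := List.mem_range.mp hi
    rw [rot_getD seq 0 i (by omega) hin, rot_getD seq 1 i (by omega) hin,
      rot_getD seq 2 i (by omega) hin, rot_getD seq 3 i (by omega) hin,
      rot_getD seq 4 i (by omega) hin]
    rfl
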